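-- pv_equiv track=rewrite | github.com/RiddMa/PythonOJ | 5/C.py | isHd
-- ===== SOURCE A (Python) =====
-- def isHd(n):
--     numStr = str(n)
--     maxStr = ""
--     minStr = ""
--     for it in sorted(numStr, reverse=True):
--         maxStr += str(it)
--     for it in sorted(numStr):
--         minStr += str(it)
--     if int(maxStr) - int(minStr) == n:
--         return True
--     else:
--         return False
-- ===== SOURCE B (Python) =====
-- def isHd(n):
--     counts = {}
--     for ch in str(n):
--         counts[ch] = counts.get(ch, 0) + 1
--     maxStr = ""
--     for d in "9876543210":
--         maxStr += d * counts.get(d, 0)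
--     minStr = ""
--     for d in "0123456789":
--         minStr += d * counts.get(d, 0)
--     return int(maxStr) - int(minStr) == n
-- ===== Notes on version B (the rewrite author's own statement) =====
-- stated objective: alternative
-- what changed: Replaces A's two comparison sorts of str(n) with one character-frequency table plus two bucket-emission passes over the digit buckets in descending and ascending order (a counting sort), then converts with int() as A does.
import Mathlib
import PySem

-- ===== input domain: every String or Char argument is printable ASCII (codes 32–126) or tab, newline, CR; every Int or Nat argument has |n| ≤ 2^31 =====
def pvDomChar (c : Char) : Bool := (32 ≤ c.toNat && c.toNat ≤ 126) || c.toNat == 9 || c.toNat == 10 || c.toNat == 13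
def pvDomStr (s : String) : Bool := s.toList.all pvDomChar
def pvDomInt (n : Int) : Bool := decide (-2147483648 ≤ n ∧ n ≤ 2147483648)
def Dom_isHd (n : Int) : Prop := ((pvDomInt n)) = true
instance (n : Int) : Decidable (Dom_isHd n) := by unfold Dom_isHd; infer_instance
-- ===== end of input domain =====

-- B replaces A's two comparison sorts of the digit string by one character-frequency table
-- and two bucket-emission passes (a counting sort); same return value wherever A returns.

-- ===== PORT A =====
def isHd (n : Int) : Bool :=
  let numStr := PySem.Int.toChars n
  let maxStr := (PySem.List.sorted numStr (fun c => c) true).foldl (fun acc it => acc ++ [it]) []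
  let minStr := (PySem.List.sorted numStr (fun c => c) false).foldl (fun acc it => acc ++ [it]) []
  match PySem.Int.ofChars? maxStr, PySem.Int.ofChars? minStr with
  | some mx, some mn => decide (mx - mn = n)
  | _, _ => false   -- int() ValueError (n < 0 puts '-' last in maxStr); excluded by Pre_isHd

-- ===== PORT B =====
def isHd_alt (n : Int) : Bool :=
  let counts := (PySem.Int.toChars n).foldl
    (fun d ch => d.insert ch (d.getD ch 0 + 1)) (PySem.Dict.empty : PySem.Dict Char Int)
  let maxStr := ("9876543210".toList).foldl
    (fun acc d => acc ++ PySem.List.pyRepeat [d] (counts.getD d 0)) []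
  let minStr := ("0123456789".toList).foldl
    (fun acc d => acc ++ PySem.List.pyRepeat [d] (counts.getD d 0)) []
  match PySem.Int.ofChars? maxStr with
  | none => false
  | some mx =>
    match PySem.Int.ofChars? minStr with
    | none => false
    | some mn => decide (mx - mn = n)

-- ===== PRECONDITION & SPEC =====
-- Pre_ excludes n < 0: there str(n) contains '-', A's descending sort puts it last and
-- int(maxStr) raises ValueError, so A returns on exactly the n ≥ 0 inputs.
def Pre_isHd (n : Int) : Prop := 0 ≤ n
instance (n : Int) : Decidable (Pre_isHd n) := by unfold Pre_isHd; infer_instance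
def pvWitness_isHd : Int := (495)

def Spec_isHd (n : Int) (out : Bool) : Prop := out = isHd_alt n
instance (n : Int) (out : Bool) : Decidable (Spec_isHd n out) := by unfold Spec_isHd; infer_instance

-- ===== CLAIM (what is proved, stated in full; the proofs are below) =====
def Claim_equal_isHd : Prop := ∀ (n : Int), Dom_isHd n → Pre_isHd n → Spec_isHd n (isHd n)

-- ===== LEMMAS AND PROOFS =====

-- every char Nat.toDigits 10 emits is a decimal digit character
lemma pvDigitChar_mem (m : Nat) (h : m < 10) : Nat.digitChar m ∈ "0123456789".toList := by
  interval_cases m <;> decide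

lemma pvToDigitsCore_mem (f : Nat) : ∀ (m : Nat) (acc : List Char), ∀ c ∈ Nat.toDigitsCore 10 f m acc,
    c ∈ "0123456789".toList ∨ c ∈ acc := by
  induction f with
  | zero => intro m acc c hc; right; simpa [Nat.toDigitsCore] using hc
  | succ f ih =>
    intro m acc c hc
    rw [Nat.toDigitsCore] at hc
    by_cases h0 : m / 10 = 0
    · simp only [if_pos h0] at hc
      rcases List.mem_cons.1 hc with h | h
      · exact Or.inl (h ▸ pvDigitChar_mem _ (Nat.mod_lt _ (by omega)))
      · exact Or.inr h
    · simp only [if_neg h0] at hc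
      rcases ih _ _ c hc with h | h
      · exact Or.inl h
      · rcases List.mem_cons.1 h with h | h
        · exact Or.inl (h ▸ pvDigitChar_mem _ (Nat.mod_lt _ (by omega)))
        · exact Or.inr h

lemma pvToChars_mem (n : Int) (h : 0 ≤ n) : ∀ c ∈ PySem.Int.toChars n, c ∈ "0123456789".toList := by
  intro c hc
  rw [PySem.Int.toChars, if_neg (not_lt.2 h)] at hc
  rcases pvToDigitsCore_mem _ _ _ c (by simpa [Nat.toDigits] using hc) with h | h
  · exact h
  · simp at h

-- bucket emission: each digit of ds repeated by its multiplicity in s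
def pvEmit (s ds : List Char) : List Char := ds.flatMap (fun d => List.replicate (s.count d) d)

lemma pvCount_emit (s : List Char) (a : Char) : ∀ (ds : List Char), ds.Nodup →
    (pvEmit s ds).count a = if a ∈ ds then s.count a else 0 := by
  intro ds
  induction ds with
  | nil => simp [pvEmit]
  | cons d ds ih =>
    intro hnd
    simp only [pvEmit, List.flatMap_cons, List.count_append] at *
    rw [ih hnd.of_cons, List.count_replicate]
    by_cases hda : a = d
    · subst hda
      have : a ∉ ds := (List.nodup_cons.1 hnd).1
      simp [this]
    · simp [hda, Ne.symm hda, List.mem_cons]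

lemma pvPerm_emit (s ds : List Char) (hnd : ds.Nodup) (hcov : ∀ c ∈ s, c ∈ ds) :
    (pvEmit s ds).Perm s := by
  rw [List.perm_iff_count]
  intro a
  rw [pvCount_emit s a ds hnd]
  by_cases h : a ∈ ds
  · simp [h]
  · simp only [if_neg h]
    exact (List.count_eq_zero.2 (fun ha => h (hcov a ha))).symm

lemma pvPairwise_emit (s ds : List Char) (hp : ds.Pairwise (· < ·)) :
    (pvEmit s ds).Pairwise (· ≤ ·) := by
  induction ds with
  | nil => simp [pvEmit]
  | cons d ds ih =>
    simp only [pvEmit, List.flatMap_cons, List.pairwise_append]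
    refine ⟨?_, ih hp.of_cons, ?_⟩
    · exact List.pairwise_replicate.2 (Or.inr le_rfl)
    · intro a ha b hb
      rcases List.mem_flatMap.1 hb with ⟨d', hd', hb'⟩
      have h1 : a = d := (List.mem_replicate.1 ha).2
      have h2 : b = d' := (List.mem_replicate.1 hb').2
      have : d < d' := (List.pairwise_cons.1 hp).1 d' hd'
      rw [h1, h2]; exact le_of_lt this

lemma pvEmit_reverse (s ds : List Char) : pvEmit s ds.reverse = (pvEmit s ds).reverse := by
  induction ds with
  | nil => rfl
  | cons d ds ih =>
    simp only [pvEmit, List.reverse_cons, List.flatMap_append, List.flatMap_cons] at *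
    simp [ih, List.reverse_append]

lemma pvSorted_asc (s : List Char) (hcov : ∀ c ∈ s, c ∈ "0123456789".toList) :
    PySem.List.sorted s (fun c => c) false = pvEmit s "0123456789".toList := by
  refine PySem.List.eq_of_perm_of_pairwise_le_of_injective (fun c => c) (fun a b h => h) ?_ ?_ ?_
  · exact (PySem.List.sorted_perm s (fun c => c) false).trans
      (pvPerm_emit s _ (by decide) hcov).symm
  · exact PySem.List.sorted_pairwise s (fun c => c)
  · exact pvPairwise_emit s _ (by decide)

lemma pvSorted_desc (s : List Char) (hcov : ∀ c ∈ s, c ∈ "0123456789".toList) :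
    PySem.List.sorted s (fun c => c) true = pvEmit s "9876543210".toList := by
  have h9 : ("9876543210".toList : List Char) = ("0123456789".toList : List Char).reverse := by decide
  rw [h9, pvEmit_reverse]
  have key : (PySem.List.sorted s (fun c => c) true).reverse = pvEmit s "0123456789".toList := by
    refine PySem.List.eq_of_perm_of_pairwise_le_of_injective (fun c => c) (fun a b h => h) ?_ ?_ ?_
    · exact ((PySem.List.sorted s (fun c => c) true).reverse_perm.trans
        (PySem.List.sorted_perm s (fun c => c) true)).trans (pvPerm_emit s _ (by decide) hcov).symm
    · exact List.pairwise_reverse.2 (PySem.List.sorted_pairwise_rev s (fun c => c))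
    · exact pvPairwise_emit s _ (by decide)
  rw [← key, List.reverse_reverse]

-- ===== VERDICT (by name: the statement is the Claim_ definition above) =====
theorem isHd_spec : Claim_equal_isHd := by
  intro n _ hpre
  unfold Spec_isHd isHd isHd_alt
  have hcov := pvToChars_mem n hpre
  have hB : ∀ (ds : List Char),
      ds.foldl (fun acc d => acc ++ PySem.List.pyRepeat [d]
        (((PySem.Int.toChars n).foldl (fun d ch => d.insert ch (d.getD ch 0 + 1))
          (PySem.Dict.empty : PySem.Dict Char Int)).getD d 0)) [] = pvEmit (PySem.Int.toChars n) ds := by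
    intro ds
    rw [PySem.List.foldl_append_eq_flatMap]
    simp only [PySem.Dict.getD_foldl_insert_add_one, PySem.Dict.getD_empty, zero_add,
      PySem.List.pyRepeat_singleton, Int.toNat_natCast, List.nil_append]
    rfl
  simp only [PySem.List.foldl_append_singleton, List.nil_append, hB,
    pvSorted_asc _ hcov, pvSorted_desc _ hcov]
  cases PySem.Int.ofChars? (pvEmit (PySem.Int.toChars n) "9876543210".toList) <;>
    cases PySem.Int.ofChars? (pvEmit (PySem.Int.toChars n) "0123456789".toList) <;> rfl
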